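-- pv_equiv track=rewrite | github.com/6210qwe/leetcode_py | leetcode_solutions/by_id/q2603.py | top_k_students
-- ===== SOURCE A (Python) =====
-- from typing import List
-- import heapq
--
-- def top_k_students(positive_feedback: List[str], negative_feedback: List[str], report: List[str], student_id: List[int], k: int) -> List[int]:
--     # 将正面和负面词汇存储在哈希集合中
--     positive_set = set(positive_feedback)
--     negative_set = set(negative_feedback)
--
--     # 计算每个学生的分数
--     scores = []
--     for i, r in enumerate(report):
--         score = 0
--         words = r.split()
--         for word in words:
--             if word in positive_set:
--                 score += 3
--             elif word in negative_set:
--                 score -= 1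
--         scores.append((-score, student_id[i]))
--
--     # 使用堆来获取前 k 名学生
--     heapq.heapify(scores)
--     result = [heapq.heappop(scores)[1] for _ in range(k)]
--     return result
-- ===== SOURCE B (Python) =====
-- def top_k_students(positive_feedback, negative_feedback, report, student_id, k):
--     pos = set(positive_feedback)
--     neg = set(negative_feedback)
--     pairs = sorted(
--         (-sum(3 if w in pos else -1 if w in neg else 0 for w in r.split()), sid)
--         for r, sid in zip(report, student_id)
--     )
--     return [pairs[i][1] for i in range(k)]
-- ===== Notes on version B (the rewrite author's own statement) =====
-- stated objective: simpler
-- what changed: B replaces A's heapify-then-k-heappops top-k selection by sorting the (-score, id) pairs once with sorted() and indexing out the first k ids; the per-report scoring loop becomes a generator-expression sum.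
import Mathlib
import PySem

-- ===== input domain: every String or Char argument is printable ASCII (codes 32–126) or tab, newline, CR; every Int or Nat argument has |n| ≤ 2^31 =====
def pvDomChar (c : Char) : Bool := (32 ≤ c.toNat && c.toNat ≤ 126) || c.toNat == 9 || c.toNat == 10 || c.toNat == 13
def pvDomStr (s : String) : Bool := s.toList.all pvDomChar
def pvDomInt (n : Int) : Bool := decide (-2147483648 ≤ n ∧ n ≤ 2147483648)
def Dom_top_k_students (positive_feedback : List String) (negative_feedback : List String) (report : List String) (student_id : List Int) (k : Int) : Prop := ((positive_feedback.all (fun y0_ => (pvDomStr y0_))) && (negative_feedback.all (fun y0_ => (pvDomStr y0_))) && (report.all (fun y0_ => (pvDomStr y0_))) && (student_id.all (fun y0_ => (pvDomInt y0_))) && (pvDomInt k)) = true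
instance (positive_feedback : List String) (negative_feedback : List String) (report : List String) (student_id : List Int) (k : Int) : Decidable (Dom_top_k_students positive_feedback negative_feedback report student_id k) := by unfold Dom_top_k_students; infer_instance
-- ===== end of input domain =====

-- B replaces A's heapify + k heappops top-k selection by one full lexicographic sort followed by
-- taking the first k entries (objective: simpler).

-- ===== PORT A =====
-- Helpers shared by the two ports: the heap element default (never read under Pre_) and
-- Python's tuple comparison on (Int, Int), which is the lexicographic order (toLex).
def pvD : Int × Int := (0, 0)

def pvLt (a b : Int × Int) : Bool := decide (toLex a < toLex b)

-- CPython heapq._siftdown, transcribed loop for loop (the heap list is passed functionally).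
def pvSiftdownLoop (h : List (Int × Int)) (start pos : Nat) (newitem : Int × Int) : List (Int × Int) :=
  if _h1 : start < pos then
    if pvLt newitem (h.getD ((pos - 1) / 2) pvD) then
      pvSiftdownLoop (h.set pos (h.getD ((pos - 1) / 2) pvD)) start ((pos - 1) / 2) newitem
    else h.set pos newitem
  else h.set pos newitem
termination_by pos
decreasing_by omega

-- CPython heapq._siftup's childpos selection: the right child when it exists and is not larger.
def pvChild (h : List (Int × Int)) (pos : Nat) : Nat :=
  if 2 * pos + 2 < h.length && !(pvLt (h.getD (2 * pos + 1) pvD) (h.getD (2 * pos + 2) pvD))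
    then 2 * pos + 2 else 2 * pos + 1

-- CPython heapq._siftup: bubble the hole down to a leaf, then _siftdown back up.
def pvSiftupLoop (h : List (Int × Int)) (pos : Nat) (newitem : Int × Int) (start : Nat) : List (Int × Int) :=
  if _h1 : 2 * pos + 1 < h.length then
    pvSiftupLoop (h.set pos (h.getD (pvChild h pos) pvD)) (pvChild h pos) newitem start
  else pvSiftdownLoop h start pos newitem
termination_by h.length - pos
decreasing_by simp only [List.length_set, pvChild]; split <;> omega

def pvSiftup (h : List (Int × Int)) (i : Nat) : List (Int × Int) :=
  pvSiftupLoop h i (h.getD i pvD) i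

-- heapq.heapify: for i in reversed(range(n//2)): _siftup(x, i)
def pvHeapify (h : List (Int × Int)) : List (Int × Int) :=
  ((List.range (h.length / 2)).reverse).foldl (fun acc i => pvSiftup acc i) h

-- heapq.heappop (on h = [] Python raises IndexError; excluded by Pre_, the port returns a dummy).
def pvHeappop (h : List (Int × Int)) : (Int × Int) × List (Int × Int) :=
  let lastelt := h.getLastD pvD
  match h.dropLast with
  | [] => (lastelt, [])
  | x :: t => (x, pvSiftup ((x :: t).set 0 lastelt) 0)

def top_k_students (positive_feedback : List String) (negative_feedback : List String) (report : List String) (student_id : List Int) (k : Int) : List Int :=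
  let positive_set := PySem.Set.ofList positive_feedback
  let negative_set := PySem.Set.ofList negative_feedback
  let scores := (PySem.List.enumerate report 0).foldl (fun acc p =>
      let score := (PySem.Str.split₀ p.2).foldl
        (fun s w => if positive_set.contains w then s + 3 else if negative_set.contains w then s - 1 else s)
        (0 : Int)
      acc ++ [(-score, PySem.List.pyGetD student_id p.1 0)]) []
  let heap := pvHeapify scores
  ((PySem.List.pyRange 0 k 1).foldl
    (fun st _ => let pr := pvHeappop st.1; (pr.2, st.2 ++ [pr.1.2]))
    (heap, ([] : List Int))).2

-- ===== PORT B =====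
-- sorted(pairs) compares (Int, Int) tuples lexicographically: key (fun p => toLex p).
def top_k_students_alt (positive_feedback : List String) (negative_feedback : List String) (report : List String) (student_id : List Int) (k : Int) : List Int :=
  let pos := PySem.Set.ofList positive_feedback
  let neg := PySem.Set.ofList negative_feedback
  let pairs := PySem.List.sorted
    ((report.zip student_id).map (fun rs =>
      (-(((PySem.Str.split₀ rs.1).map
            (fun w => if pos.contains w then (3 : Int) else if neg.contains w then (-1 : Int) else 0)).sum),
       rs.2)))
    (fun p => toLex p)
  (PySem.List.pyRange 0 k 1).map (fun i => (PySem.List.pyGetD pairs i pvD).2)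

-- ===== PRECONDITION & SPEC =====
-- Pre_ excludes exactly the inputs where A raises IndexError: a student_id list shorter than report
-- (student_id[i] out of range) and k larger than the number of students (heappop from an empty heap).
def Pre_top_k_students (positive_feedback : List String) (negative_feedback : List String) (report : List String) (student_id : List Int) (k : Int) : Prop :=
  report.length ≤ student_id.length ∧ k ≤ (report.length : Int)
instance (positive_feedback : List String) (negative_feedback : List String) (report : List String) (student_id : List Int) (k : Int) : Decidable (Pre_top_k_students positive_feedback negative_feedback report student_id k) := by unfold Pre_top_k_students; infer_instance

def pvWitness_top_k_students : List String × List String × List String × List Int × Int :=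
  (["good"], ["bad"], ["good x", "bad x", "x"], [1, 2, 3], 2)

def Spec_top_k_students (positive_feedback : List String) (negative_feedback : List String) (report : List String) (student_id : List Int) (k : Int) (out : List Int) : Prop := out = top_k_students_alt positive_feedback negative_feedback report student_id k
instance (positive_feedback : List String) (negative_feedback : List String) (report : List String) (student_id : List Int) (k : Int) (out : List Int) : Decidable (Spec_top_k_students positive_feedback negative_feedback report student_id k out) := by unfold Spec_top_k_students; infer_instance

-- ===== CLAIM (what is proved, stated in full; the proofs are below) =====
def Claim_equal_top_k_students : Prop := ∀ (positive_feedback : List String) (negative_feedback : List String) (report : List String) (student_id : List Int) (k : Int), Dom_top_k_students positive_feedback negative_feedback report student_id k → Pre_top_k_students positive_feedback negative_feedback report student_id k → Spec_top_k_students positive_feedback negative_feedback report student_id k (top_k_students positive_feedback negative_feedback report student_id k)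

-- ===== LEMMAS AND PROOFS =====

theorem pvWitness_ok : Dom_top_k_students (pvWitness_top_k_students.1) (pvWitness_top_k_students.2.1) (pvWitness_top_k_students.2.2.1) (pvWitness_top_k_students.2.2.2.1) (pvWitness_top_k_students.2.2.2.2) ∧ Pre_top_k_students (pvWitness_top_k_students.1) (pvWitness_top_k_students.2.1) (pvWitness_top_k_students.2.2.1) (pvWitness_top_k_students.2.2.2.1) (pvWitness_top_k_students.2.2.2.2) := by
  decide

-- ---- order facts ----
def pvLe (a b : Int × Int) : Prop := toLex a ≤ toLex b

theorem pvLe_refl (a : Int × Int) : pvLe a a := le_refl _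

theorem pvLe_trans {a b c : Int × Int} (h1 : pvLe a b) (h2 : pvLe b c) : pvLe a c := le_trans h1 h2

theorem pvLe_of_lt {a b : Int × Int} (h : pvLt a b = true) : pvLe a b :=
  le_of_lt (of_decide_eq_true h)

theorem pvLe_of_not_lt {a b : Int × Int} (h : ¬ pvLt a b = true) : pvLe b a :=
  le_of_not_gt (fun hlt => h (decide_eq_true hlt))

-- ---- getD / set / perm plumbing ----
theorem pvGetD_set (h : List (Int × Int)) (i j : Nat) (v : Int × Int) (hi : i < h.length) :
    (h.set i v).getD j pvD = if j = i then v else h.getD j pvD := by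
  rcases eq_or_ne j i with rfl | hj
  · simp [List.getD, List.getElem?_set, hi]
  · simp [List.getD, List.getElem?_set, hj, Ne.symm hj]

theorem pvGetD_append_lt (l : List (Int × Int)) (a : Int × Int) (j : Nat) (hj : j < l.length) :
    (l ++ [a]).getD j pvD = l.getD j pvD := by
  simp [List.getD, List.getElem?_append_left hj]

theorem pvHead_set_perm : ∀ (t : List (Int × Int)) (j : Nat) (x : Int × Int), j < t.length →
    ((t.getD j pvD) :: t.set j x).Perm (x :: t)
  | y :: s, 0, x, _ => by
    simpa using List.Perm.swap x y s
  | y :: s, j + 1, x, hj => by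
    have ih := pvHead_set_perm s j x (by simpa using hj)
    simp only [List.getD_cons_succ, List.set_cons_succ]
    exact ((List.Perm.swap y (s.getD j pvD) (s.set j x)).trans (ih.cons y)).trans
      (List.Perm.swap x y s)

theorem pvSwap_perm : ∀ (l : List (Int × Int)) (i j : Nat), i < l.length → j < l.length →
    ((l.set i (l.getD j pvD)).set j (l.getD i pvD)).Perm l
  | x :: t, 0, 0, _, _ => by simp
  | x :: t, 0, j + 1, hi, hj => by
    simp only [List.getD_cons_succ, List.getD_cons_zero, List.set_cons_zero, List.set_cons_succ]
    exact pvHead_set_perm t j x (by simpa using hj)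
  | x :: t, i + 1, 0, hi, hj => by
    simp only [List.getD_cons_succ, List.getD_cons_zero, List.set_cons_succ, List.set_cons_zero]
    exact pvHead_set_perm t i x (by simpa using hi)
  | x :: t, i + 1, j + 1, hi, hj => by
    simp only [List.getD_cons_succ, List.set_cons_succ]
    exact (pvSwap_perm t i j (by simpa using hi) (by simpa using hj)).cons x

theorem pvSet_set_perm (h : List (Int × Int)) (p q : Nat) (v : Int × Int)
    (hp : p < h.length) (hq : q < h.length) (hne : p ≠ q) :
    ((h.set p (h.getD q pvD)).set q v).Perm (h.set p v) := by
  have h1 : (h.set p v).getD q pvD = h.getD q pvD := by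
    rw [pvGetD_set h p q v hp, if_neg (Ne.symm hne)]
  have h2 : (h.set p v).getD p pvD = v := by
    rw [pvGetD_set h p p v hp, if_pos rfl]
  have key := pvSwap_perm (h.set p v) p q (by simpa using hp) (by simpa using hq)
  rw [h1, h2, List.set_set] at key
  exact key

-- ---- heap invariants ----
def pvHeapFrom (h : List (Int × Int)) (s : Nat) : Prop :=
  ∀ j, 0 < j → j < h.length → s ≤ (j - 1) / 2 → pvLe (h.getD ((j - 1) / 2) pvD) (h.getD j pvD)

def pvInvI (h : List (Int × Int)) (s pos : Nat) : Prop :=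
  ∀ p c, s ≤ p → p ≠ pos → c ≠ pos → (c = 2 * p + 1 ∨ c = 2 * p + 2) → c < h.length →
    pvLe (h.getD p pvD) (h.getD c pvD)

def pvInvII (h : List (Int × Int)) (s pos : Nat) : Prop :=
  s < pos → ∀ c, (c = 2 * pos + 1 ∨ c = 2 * pos + 2) → c < h.length →
    pvLe (h.getD ((pos - 1) / 2) pvD) (h.getD c pvD)

def pvInvIII (h : List (Int × Int)) (pos : Nat) (ni : Int × Int) : Prop :=
  ∀ c, (c = 2 * pos + 1 ∨ c = 2 * pos + 2) → c < h.length → pvLe ni (h.getD c pvD)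

def pvDesc (s p : Nat) : Prop :=
  if p ≤ s then p = s else pvDesc s ((p - 1) / 2)
termination_by p
decreasing_by omega

theorem pvDesc_self (s : Nat) : pvDesc s s := by unfold pvDesc; simp

theorem pvDesc_le {s p : Nat} (h : pvDesc s p) : s ≤ p := by
  unfold pvDesc at h; split at h <;> omega

theorem pvDesc_parent {s p : Nat} (h : pvDesc s p) (hlt : s < p) :
    s ≤ (p - 1) / 2 ∧ pvDesc s ((p - 1) / 2) := by
  unfold pvDesc at h
  rw [if_neg (by omega)] at h
  exact ⟨pvDesc_le h, h⟩

theorem pvDesc_child {s p c : Nat} (h : pvDesc s p) (hc : c = 2 * p + 1 ∨ c = 2 * p + 2) :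
    pvDesc s c := by
  have hsp := pvDesc_le h
  have hpc : (c - 1) / 2 = p := by omega
  unfold pvDesc
  rw [if_neg (by omega), hpc]
  exact h

-- ---- loop specifications ----
theorem pvSiftdownLoop_spec : ∀ (pos : Nat) (h : List (Int × Int)) (s : Nat) (ni : Int × Int),
    pos < h.length → s ≤ pos → pvDesc s pos →
    pvInvI h s pos → pvInvII h s pos → pvInvIII h pos ni →
    pvHeapFrom (pvSiftdownLoop h s pos ni) s ∧ (pvSiftdownLoop h s pos ni).Perm (h.set pos ni) := by
  intro pos
  induction pos using Nat.strong_induction_on with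
  | _ pos IH =>
    intro h s ni hpos hs hd h1 h2 h3
    unfold pvSiftdownLoop
    by_cases hsp : s < pos
    · rw [dif_pos hsp]
      have hparlt : (pos - 1) / 2 < pos := by omega
      have hparlen : (pos - 1) / 2 < h.length := by omega
      obtain ⟨hspar, hdpar⟩ := pvDesc_parent hd hsp
      have hG : ∀ x v, (h.set pos v).getD x pvD = if x = pos then v else h.getD x pvD :=
        fun x v => pvGetD_set h pos x v hpos
      by_cases hlt : pvLt ni (h.getD ((pos - 1) / 2) pvD) = true
      · rw [if_pos hlt]
        have invI' : pvInvI (h.set pos (h.getD ((pos - 1) / 2) pvD)) s ((pos - 1) / 2) := by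
          intro p c hp hpp hcp hch hclen
          rw [List.length_set] at hclen
          rw [hG p, hG c]
          by_cases hcpos : c = pos
          · exfalso; omega
          · rw [if_neg hcpos]
            by_cases hppos : p = pos
            · rw [if_pos hppos]
              exact h2 hsp c (by omega) hclen
            · rw [if_neg hppos]
              exact h1 p c hp hppos hcpos hch hclen
        have invII' : pvInvII (h.set pos (h.getD ((pos - 1) / 2) pvD)) s ((pos - 1) / 2) := by
          intro hspar' c hch hclen
          rw [List.length_set] at hclen
          obtain ⟨hsg, _⟩ := pvDesc_parent hdpar hspar'
          rw [hG c, hG (((pos - 1) / 2 - 1) / 2), if_neg (by omega : ((pos - 1) / 2 - 1) / 2 ≠ pos)]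
          by_cases hcpos : c = pos
          · rw [if_pos hcpos]
            exact h1 (((pos - 1) / 2 - 1) / 2) ((pos - 1) / 2) hsg (by omega) (by omega)
              (by omega) (by omega)
          · rw [if_neg hcpos]
            exact pvLe_trans
              (h1 (((pos - 1) / 2 - 1) / 2) ((pos - 1) / 2) hsg (by omega) (by omega)
                (by omega) (by omega))
              (h1 ((pos - 1) / 2) c (by omega) (by omega) hcpos hch hclen)
        have invIII' : pvInvIII (h.set pos (h.getD ((pos - 1) / 2) pvD)) ((pos - 1) / 2) ni := by
          intro c hch hclen
          rw [List.length_set] at hclen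
          rw [hG c]
          by_cases hcpos : c = pos
          · rw [if_pos hcpos]
            exact pvLe_of_lt hlt
          · rw [if_neg hcpos]
            exact pvLe_trans (pvLe_of_lt hlt) (h1 ((pos - 1) / 2) c hspar (by omega) hcpos hch hclen)
        have key := IH ((pos - 1) / 2) hparlt (h.set pos (h.getD ((pos - 1) / 2) pvD)) s ni
          (by rw [List.length_set]; exact hparlen) hspar hdpar invI' invII' invIII'
        exact ⟨key.1, key.2.trans (pvSet_set_perm h pos ((pos - 1) / 2) ni hpos hparlen (by omega))⟩
      · rw [if_neg hlt]
        refine ⟨?_, List.Perm.refl _⟩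
        intro j hj hjlen hsparj
        rw [List.length_set] at hjlen
        rw [hG j, hG ((j - 1) / 2)]
        by_cases hjpos : j = pos
        · rw [if_pos hjpos, if_neg (by omega : (j - 1) / 2 ≠ pos), hjpos]
          exact pvLe_of_not_lt hlt
        · rw [if_neg hjpos]
          by_cases hpj : (j - 1) / 2 = pos
          · rw [if_pos hpj]
            exact h3 j (by omega) hjlen
          · rw [if_neg hpj]
            exact h1 ((j - 1) / 2) j hsparj hpj hjpos (by omega) hjlen
    · rw [dif_neg hsp]
      have hG : ∀ x v, (h.set pos v).getD x pvD = if x = pos then v else h.getD x pvD :=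
        fun x v => pvGetD_set h pos x v hpos
      refine ⟨?_, List.Perm.refl _⟩
      intro j hj hjlen hsparj
      rw [List.length_set] at hjlen
      by_cases hjpos : j = pos
      · exfalso; omega
      · rw [hG j, if_neg hjpos, hG ((j - 1) / 2)]
        by_cases hpj : (j - 1) / 2 = pos
        · rw [if_pos hpj]
          exact h3 j (by omega) hjlen
        · rw [if_neg hpj]
          exact h1 ((j - 1) / 2) j hsparj hpj hjpos (by omega) hjlen

theorem pvChild_spec (h : List (Int × Int)) (pos : Nat) (hc : 2 * pos + 1 < h.length) :
    (pvChild h pos = 2 * pos + 1 ∨ pvChild h pos = 2 * pos + 2) ∧ pvChild h pos < h.length ∧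
    ∀ sib, (sib = 2 * pos + 1 ∨ sib = 2 * pos + 2) → sib < h.length →
      pvLe (h.getD (pvChild h pos) pvD) (h.getD sib pvD) := by
  by_cases hl2 : 2 * pos + 2 < h.length
  · cases hb : pvLt (h.getD (2 * pos + 1) pvD) (h.getD (2 * pos + 2) pvD) with
    | true =>
      have hceq : pvChild h pos = 2 * pos + 1 := by rw [pvChild, hb]; simp
      refine ⟨Or.inl hceq, by omega, ?_⟩
      intro sib hsib hsl
      rw [hceq]
      rcases hsib with rfl | rfl
      · exact pvLe_refl _
      · exact pvLe_of_lt hb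
    | false =>
      have hceq : pvChild h pos = 2 * pos + 2 := by rw [pvChild, hb]; simp [hl2]
      refine ⟨Or.inr hceq, by omega, ?_⟩
      intro sib hsib hsl
      rw [hceq]
      rcases hsib with rfl | rfl
      · exact pvLe_of_not_lt (fun hh => by rw [hh] at hb; cases hb)
      · exact pvLe_refl _
  · have hceq : pvChild h pos = 2 * pos + 1 := by simp [pvChild, hl2]
    refine ⟨Or.inl hceq, by omega, ?_⟩
    intro sib hsib hsl
    rw [hceq]
    rcases hsib with rfl | rfl
    · exact pvLe_refl _
    · exact absurd hsl (by omega)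

theorem pvSiftupLoop_spec : ∀ (fuel : Nat) (h : List (Int × Int)) (pos s : Nat) (ni : Int × Int),
    h.length - pos ≤ fuel → pos < h.length → s ≤ pos → pvDesc s pos →
    pvInvI h s pos → pvInvII h s pos →
    pvHeapFrom (pvSiftupLoop h pos ni s) s ∧ (pvSiftupLoop h pos ni s).Perm (h.set pos ni) := by
  intro fuel
  induction fuel with
  | zero => intro h pos s ni hf hpos _ _ _ _; omega
  | succ fuel ih =>
    intro h pos s ni hf hpos hs hd h1 h2
    unfold pvSiftupLoop
    by_cases hc : 2 * pos + 1 < h.length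
    · rw [dif_pos hc]
      obtain ⟨hcchild, hclen, hmin⟩ := pvChild_spec h pos hc
      have hposc : pos < pvChild h pos := by omega
      have hG : ∀ x v, (h.set pos v).getD x pvD = if x = pos then v else h.getD x pvD :=
        fun x v => pvGetD_set h pos x v hpos
      have invI' : pvInvI (h.set pos (h.getD (pvChild h pos) pvD)) s (pvChild h pos) := by
        intro p cc hp hpc hccc hch hcclen
        rw [List.length_set] at hcclen
        rw [hG p, hG cc]
        by_cases hccpos : cc = pos
        · rw [if_pos hccpos, if_neg (by omega : p ≠ pos)]
          rcases Nat.lt_or_ge s pos with hsp | hsp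
          · have hp' : p = (pos - 1) / 2 := by omega
            rw [hp']
            exact h2 hsp (pvChild h pos) hcchild hclen
          · exfalso; omega
        · rw [if_neg hccpos]
          by_cases hppos : p = pos
          · rw [if_pos hppos]
            exact hmin cc (by omega) hcclen
          · rw [if_neg hppos]
            exact h1 p cc hp hppos hccpos hch hcclen
      have invII' : pvInvII (h.set pos (h.getD (pvChild h pos) pvD)) s (pvChild h pos) := by
        intro _ cc hch hcclen
        rw [List.length_set] at hcclen
        have hparc : (pvChild h pos - 1) / 2 = pos := by omega
        rw [hG cc, hG ((pvChild h pos - 1) / 2), hparc, if_pos rfl,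
          if_neg (by omega : cc ≠ pos)]
        exact h1 (pvChild h pos) cc (by omega) (by omega) (by omega) hch hcclen
      have key := ih (h.set pos (h.getD (pvChild h pos) pvD)) (pvChild h pos) s ni
        (by rw [List.length_set]; omega) (by rw [List.length_set]; exact hclen) (by omega)
        (pvDesc_child hd hcchild) invI' invII'
      exact ⟨key.1, key.2.trans (pvSet_set_perm h pos (pvChild h pos) ni hpos hclen (by omega))⟩
    · rw [dif_neg hc]
      exact pvSiftdownLoop_spec pos h s ni hpos hs hd h1 h2
        (by intro cc hch hcclen; omega)

theorem pvSiftup_spec (h : List (Int × Int)) (i : Nat) (hi : i < h.length)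
    (hpre : pvHeapFrom h (i + 1)) :
    pvHeapFrom (pvSiftup h i) i ∧ (pvSiftup h i).Perm h := by
  have key := pvSiftupLoop_spec (h.length - i) h i i (h.getD i pvD) le_rfl hi le_rfl (pvDesc_self i)
    (by
      intro p c hp hpp hcp hch hclen
      have hj : (c - 1) / 2 = p := by omega
      have := hpre c (by omega) hclen (by omega)
      rwa [hj] at this)
    (by intro hlt; omega)
  have hset : h.set i (h.getD i pvD) = h := by
    rw [List.getD_eq_getElem h pvD hi, List.set_getElem_self]
  rw [hset] at key
  exact key

theorem pvHeapFrom_init (h : List (Int × Int)) : pvHeapFrom h (h.length / 2) := by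
  intro j hj hjlen hpar
  omega

theorem pvHeapify_aux : ∀ (m : Nat) (h : List (Int × Int)), 2 * m ≤ h.length → pvHeapFrom h m →
    pvHeapFrom ((List.range m).reverse.foldl (fun acc i => pvSiftup acc i) h) 0 ∧
    ((List.range m).reverse.foldl (fun acc i => pvSiftup acc i) h).Perm h := by
  intro m
  induction m with
  | zero =>
    intro h _ hH
    simp only [List.range_zero, List.reverse_nil, List.foldl_nil]
    exact ⟨hH, List.Perm.refl h⟩
  | succ m ih =>
    intro h hm hH
    rw [List.range_succ, List.reverse_append]
    simp only [List.reverse_cons, List.reverse_nil, List.nil_append, List.cons_append,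
      List.foldl_cons]
    have hi : m < h.length := by omega
    have spec := pvSiftup_spec h m hi hH
    have hlen : (pvSiftup h m).length = h.length := spec.2.length_eq
    have := ih (pvSiftup h m) (by omega) spec.1
    exact ⟨this.1, this.2.trans spec.2⟩

theorem pvHeapify_spec (l : List (Int × Int)) :
    pvHeapFrom (pvHeapify l) 0 ∧ (pvHeapify l).Perm l :=
  pvHeapify_aux (l.length / 2) l (by omega) (pvHeapFrom_init l)

-- ---- heappop ----
theorem pvHeapFrom_zero_min (h : List (Int × Int)) (hH : pvHeapFrom h 0) :
    ∀ j, j < h.length → pvLe (h.getD 0 pvD) (h.getD j pvD) := by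
  intro j
  induction j using Nat.strong_induction_on with
  | _ j ih =>
    intro hj
    rcases Nat.eq_zero_or_pos j with h0 | h0
    · subst h0; exact pvLe_refl _
    · have hpar := hH j h0 hj (by omega)
      exact pvLe_trans (ih ((j - 1) / 2) (by omega) (by omega)) hpar

theorem pvHeappop_spec (h : List (Int × Int)) (hne : h ≠ []) (hH : pvHeapFrom h 0) :
    ((pvHeappop h).1 :: (pvHeappop h).2).Perm h ∧ pvHeapFrom (pvHeappop h).2 0 ∧
    ∀ x ∈ h, pvLe (pvHeappop h).1 x := by
  have hmin0 := pvHeapFrom_zero_min h hH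
  rcases hdl : h.dropLast with _ | ⟨x, t⟩
  · have hlen1 : h.length = 1 := by
      have h1 := congrArg List.length hdl
      have h2 := List.length_pos_iff.mpr hne
      simp [List.length_dropLast] at h1
      omega
    obtain ⟨a, rfl⟩ := List.length_eq_one_iff.mp hlen1
    refine ⟨by simp [pvHeappop], ?_, ?_⟩
    · intro j hj hjlen
      exfalso
      simp [pvHeappop] at hjlen
    · intro y hy
      simp at hy
      subst hy
      simp only [pvHeappop]
      exact pvLe_refl _
  · have hlast : h.getLastD pvD = h.getLast hne := by
      rw [List.getLastD_eq_getLast?, List.getLast?_eq_some_getLast hne]; rfl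
    have e := List.dropLast_append_getLast hne
    rw [hdl] at e
    have hsplit : h = (x :: t) ++ [h.getLastD pvD] := by
      rw [hlast]
      exact e.symm
    have hlen : h.length = t.length + 2 := by
      have h1 := congrArg List.length hsplit
      simp at h1
      omega
    have hGj : ∀ j, 0 < j → j < t.length + 1 →
        (h.getLastD pvD :: t).getD j pvD = h.getD j pvD := by
      intro j hj hjl
      conv_rhs => rw [hsplit]
      rw [pvGetD_append_lt _ _ j (by simp; omega)]
      rcases j with _ | j
      · omega
      · simp [List.getD_cons_succ]
    have hpre : pvHeapFrom (h.getLastD pvD :: t) 1 := by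
      intro j hj hjlen hpar
      simp only [List.length_cons] at hjlen
      rw [hGj j hj hjlen, hGj ((j - 1) / 2) (by omega) (by omega)]
      exact hH j hj (by omega) (by omega)
    have hspec := pvSiftup_spec (h.getLastD pvD :: t) 0 (by simp) hpre
    have hres : pvHeappop h = (x, pvSiftup (h.getLastD pvD :: t) 0) := by
      simp only [pvHeappop, hdl, List.set_cons_zero]
    rw [hres]
    refine ⟨?_, hspec.1, ?_⟩
    · have p1 : (x :: pvSiftup (h.getLastD pvD :: t) 0).Perm (x :: h.getLastD pvD :: t) :=
        hspec.2.cons x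
      have p2 : (h.getLastD pvD :: t).Perm (t ++ [h.getLastD pvD]) :=
        (List.perm_append_singleton _ t).symm
      conv_rhs => rw [hsplit]
      simpa using p1.trans (p2.cons x)
    · intro y hy
      have hx0 : h.getD 0 pvD = x := by rw [hsplit]; rfl
      obtain ⟨j, hjlen, hjy⟩ := List.mem_iff_getElem.mp hy
      have := hmin0 j hjlen
      rw [hx0, List.getD_eq_getElem h pvD hjlen, hjy] at this
      exact this

-- ---- popping k times = taking k from the sorted list ----
def pvPopK (h : List (Int × Int)) : Nat → List (Int × Int)
  | 0 => []
  | k + 1 => (pvHeappop h).1 :: pvPopK (pvHeappop h).2 k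

theorem pvToLex_inj : Function.Injective (fun p : Int × Int => toLex p) :=
  fun _ _ hh => congrArg ofLex hh

theorem pvPopK_sorted : ∀ (k : Nat) (h : List (Int × Int)), pvHeapFrom h 0 → k ≤ h.length →
    pvPopK h k = (PySem.List.sorted h (fun p => toLex p)).take k := by
  intro k
  induction k with
  | zero => intro h _ _; simp [pvPopK]
  | succ k ih =>
    intro h hH hk
    have hne : h ≠ [] := by intro hnil; subst hnil; simp at hk
    obtain ⟨hperm, hH2, hmin⟩ := pvHeappop_spec h hne hH
    have hsort : PySem.List.sorted h (fun p => toLex p) =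
        (pvHeappop h).1 :: PySem.List.sorted (pvHeappop h).2 (fun p => toLex p) := by
      rw [PySem.List.sorted_eq_sorted_of_perm h ((pvHeappop h).1 :: (pvHeappop h).2)
        (fun p => toLex p) pvToLex_inj hperm.symm]
      apply PySem.List.eq_of_perm_of_pairwise_le_of_injective (fun p : Int × Int => toLex p) pvToLex_inj
      · exact (PySem.List.sorted_perm _ _ _).trans
          (((PySem.List.sorted_perm _ _ _).cons _).symm)
      · exact PySem.List.sorted_pairwise _ _
      · constructor
        · intro y hy
          exact hmin y (hperm.mem_iff.mp (List.mem_cons_of_mem _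
            ((PySem.List.mem_sorted _ _ _ _).mp hy)))
        · exact PySem.List.sorted_pairwise _ _
    have hlen2 : (pvHeappop h).2.length + 1 = h.length := by
      have := hperm.length_eq; simpa using this
    rw [hsort]
    simp only [pvPopK, List.take_succ_cons]
    rw [ih (pvHeappop h).2 hH2 (by omega)]

-- ---- the A-side pop fold and the B-side index map ----
theorem pvFold_pop : ∀ (L : List Int) (h : List (Int × Int)) (acc : List Int),
    (L.foldl (fun st _ => let pr := pvHeappop st.1; (pr.2, st.2 ++ [pr.1.2])) (h, acc)).2
      = acc ++ (pvPopK h L.length).map (·.2) := by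
  intro L
  induction L with
  | nil => intro h acc; simp [pvPopK]
  | cons x L ih =>
    intro h acc
    simp only [List.foldl_cons, List.length_cons]
    rw [ih]
    simp [pvPopK]

theorem pvMap_range_getD (xs : List (Int × Int)) (k : Int) (hk : k.toNat ≤ xs.length) :
    (PySem.List.pyRange 0 k 1).map (fun i => (PySem.List.pyGetD xs i pvD).2)
      = (xs.take k.toNat).map (·.2) := by
  rw [PySem.List.pyRange_one, List.map_map]
  apply List.ext_getElem
  · simp; omega
  · intro m hm1 hm2
    simp only [List.getElem_map, List.getElem_range, Function.comp_apply, List.getElem_take]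
    have hmk : m < k.toNat := by simpa using hm1
    have hmx : m < xs.length := by omega
    have : (0 : Int) + (m : Int) = ((m : Nat) : Int) := by omega
    rw [this, PySem.List.pyGetD_natCast, List.getD_eq_getElem xs pvD hmx]

-- ---- the score lists agree ----
theorem pvScore_foldl_eq (pset nset : PySem.Set String) (ws : List String) : ∀ (a : Int),
    ws.foldl (fun s w => if pset.contains w then s + 3 else if nset.contains w then s - 1 else s) a
      = a + (ws.map (fun w => if pset.contains w then (3 : Int) else if nset.contains w then (-1 : Int) else 0)).sum := by
  induction ws with
  | nil => intro a; simp
  | cons w ws ih =>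
    intro a
    simp only [List.foldl_cons, List.map_cons, List.sum_cons, ih]
    split_ifs <;> ring

theorem pvScores_eq (pset nset : PySem.Set String) (report : List String) (sid : List Int)
    (hlen : report.length ≤ sid.length) :
    (PySem.List.enumerate report 0).foldl (fun acc p =>
        acc ++ [(-((PySem.Str.split₀ p.2).foldl
            (fun s w => if pset.contains w then s + 3 else if nset.contains w then s - 1 else s)
            (0 : Int)), PySem.List.pyGetD sid p.1 0)]) []
      = (report.zip sid).map (fun rs =>
          (-(((PySem.Str.split₀ rs.1).map
              (fun w => if pset.contains w then (3 : Int) else if nset.contains w then (-1 : Int) else 0)).sum),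
           rs.2)) := by
  rw [PySem.List.foldl_append_singleton_eq_map]
  apply List.ext_getElem
  · simp [PySem.List.length_enumerate]; omega
  · intro m hm1 hm2
    simp only [List.nil_append, List.getElem_map]
    have hmr : m < report.length := by
      simp [PySem.List.length_enumerate] at hm1; omega
    have hms : m < sid.length := by omega
    rw [PySem.List.getElem_enumerate, List.getElem_zip]
    simp only [zero_add]
    rw [pvScore_foldl_eq, PySem.List.pyGetD_natCast, List.getD_eq_getElem sid 0 hms]
    simp

-- ===== VERDICT (by name: the statement is the Claim_ definition above) =====
theorem top_k_students_spec : Claim_equal_top_k_students := by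
  intro pf nf report sid k _hDom hPre
  obtain ⟨hlen, hk⟩ := hPre
  unfold Spec_top_k_students top_k_students top_k_students_alt
  simp only []
  rw [pvScores_eq (PySem.Set.ofList pf) (PySem.Set.ofList nf) report sid hlen]
  set L := (report.zip sid).map (fun rs =>
      (-(((PySem.Str.split₀ rs.1).map
          (fun w => if (PySem.Set.ofList pf).contains w then (3 : Int) else if (PySem.Set.ofList nf).contains w then (-1 : Int) else 0)).sum),
       rs.2)) with hL
  have hLlen : L.length = report.length := by
    rw [hL]; simp; omega
  have hkn : k.toNat ≤ L.length := by omega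
  rw [pvFold_pop]
  rw [PySem.List.length_pyRange_one]
  have hheap := pvHeapify_spec L
  have hheaplen : (pvHeapify L).length = L.length := hheap.2.length_eq
  have hzero : ((k : Int) - 0).toNat = k.toNat := by omega
  rw [hzero]
  rw [pvPopK_sorted k.toNat (pvHeapify L) hheap.1 (by omega)]
  rw [PySem.List.sorted_eq_sorted_of_perm (pvHeapify L) L (fun p => toLex p) pvToLex_inj hheap.2]
  rw [pvMap_range_getD _ k (by rw [PySem.List.length_sorted]; omega)]
  simp [List.map_take]
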